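-- pv_equiv track=rewrite | github.com/woshiwpa/MFPLang4JVM | docs/en/ChartPlotting/MFP_filter_converted_html.py | remove_decorates_func
-- ===== SOURCE A (Python) =====
-- def remove_decorates_func(originalTxt: str, str2Check: str) -> str:
--     idx = 0
--     isToDelete = False
--     filteredTxt = ''
--     while idx < len(originalTxt):
--         if originalTxt[idx:idx + len(str2Check)] == str2Check:
--             filteredTxt += (str2Check if (idx == 0) or (originalTxt[idx - 1] == '\n') else ('\n' + str2Check))
--             idx += len(str2Check)
--             isToDelete = True
--         elif isToDelete and originalTxt[idx:idx + 1] == '>':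
--             filteredTxt += '>'
--             idx += 1
--             isToDelete = False
--         else:
--             if not isToDelete:
--                 filteredTxt += originalTxt[idx]
--             idx += 1
--     return filteredTxt
-- ===== SOURCE B (Python) =====
-- def remove_decorates_func(originalTxt: str, str2Check: str) -> str:
--     # two-phase find-driven scanner: jump between marker/'>' occurrences instead of per-character scan
--     parts = []
--     idx = 0
--     delete = False
--     n = len(str2Check)
--     while True:
--         if not delete:
--             m = originalTxt.find(str2Check, idx)
--             if m < 0:
--                 parts.append(originalTxt[idx:])
--                 break
--             parts.append(originalTxt[idx:m])
--             parts.append(str2Check if m == 0 or originalTxt[m - 1] == '\n' else '\n' + str2Check)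
--             idx = m + n
--             delete = True
--         else:
--             m = originalTxt.find(str2Check, idx)
--             g = originalTxt.find('>', idx)
--             if m < 0 and g < 0:
--                 break
--             if g < 0 or (0 <= m and m <= g):
--                 parts.append(str2Check if m == 0 or originalTxt[m - 1] == '\n' else '\n' + str2Check)
--                 idx = m + n
--                 delete = True
--             else:
--                 parts.append('>')
--                 idx = g + 1
--                 delete = False
--     return ''.join(parts)
-- ===== Notes on version B (the rewrite author's own statement) =====
-- stated objective: faster
-- what changed: B replaces A's per-character state-machine scan (slice compare + string += at every index) with a two-phase find-driven scanner that jumps directly between marker and '>' occurrences and joins buffered pieces at the end.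
-- outside the precondition, e.g. on remove_decorates_func('', ''): A returns '', B does not finish within the time limit
import Mathlib
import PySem

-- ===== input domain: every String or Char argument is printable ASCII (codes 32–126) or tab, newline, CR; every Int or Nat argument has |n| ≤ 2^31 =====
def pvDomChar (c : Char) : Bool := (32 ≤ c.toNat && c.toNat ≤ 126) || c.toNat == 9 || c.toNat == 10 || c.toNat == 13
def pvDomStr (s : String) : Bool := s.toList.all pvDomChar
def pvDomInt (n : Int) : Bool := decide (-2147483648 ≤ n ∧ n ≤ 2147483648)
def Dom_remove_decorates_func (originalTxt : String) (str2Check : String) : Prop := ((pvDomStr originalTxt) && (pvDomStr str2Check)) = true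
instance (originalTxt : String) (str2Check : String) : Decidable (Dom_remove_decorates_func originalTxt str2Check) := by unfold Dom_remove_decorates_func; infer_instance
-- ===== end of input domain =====

-- B replaces A's per-character scan with a find-driven scanner jumping between marker/'>' occurrences (measured faster: C-level str.find + join instead of per-char slice compares and +=). Pre_ excludes str2Check = "" (A loops forever there except on empty input).


-- ===== PORT A =====
-- A's while-loop: per-character scan with an isToDelete flag; fuel = |txt| (the loop runs
-- at most |txt| iterations whenever str2Check ≠ "", which Pre_ guarantees).
def pvLoopA (txt chk : List Char) : Nat → Nat → Bool → List Char → List Char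
  | 0, _, _, acc => acc
  | f+1, idx, del, acc =>
    if idx < txt.length then
      if (txt.drop idx).take chk.length = chk then
        pvLoopA txt chk f (idx + chk.length) true
          (acc ++ (if idx = 0 ∨ txt[idx-1]? = some '\n' then chk else '\n' :: chk))
      else if del = true ∧ (txt.drop idx).take 1 = ['>'] then
        pvLoopA txt chk f (idx + 1) false (acc ++ ['>'])
      else
        pvLoopA txt chk f (idx + 1) del (if del = true then acc else acc ++ (txt.drop idx).take 1)
    else acc

def remove_decorates_func (originalTxt : String) (str2Check : String) : String :=
  String.mk (pvLoopA originalTxt.toList str2Check.toList originalTxt.toList.length 0 false [])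

-- ===== PORT B =====
-- B's str.find(needle, start): first position ≥ start where needle occurs, none otherwise.
def pvFindFrom (txt chk : List Char) (i : Nat) : Option Nat :=
  if h : txt.length ≤ i then none
  else if (txt.drop i).take chk.length = chk then some i
  else pvFindFrom txt chk (i+1)
termination_by txt.length - i
decreasing_by omega

-- B's loop: in copy mode jump to the next marker, in delete mode jump to whichever of the
-- next marker / next '>' comes first (marker wins ties); fuel = |txt|+1.
def pvLoopB (txt chk : List Char) : Nat → Nat → Bool → List Char → List Char
  | 0, _, _, acc => acc
  | f+1, idx, del, acc =>
    if del = false then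
      match pvFindFrom txt chk idx with
      | none => acc ++ txt.drop idx
      | some m =>
        pvLoopB txt chk f (m + chk.length) true
          (acc ++ (txt.drop idx).take (m - idx) ++
            (if m = 0 ∨ txt[m-1]? = some '\n' then chk else '\n' :: chk))
    else
      match pvFindFrom txt chk idx, pvFindFrom txt ['>'] idx with
      | none, none => acc
      | some m, none =>
        pvLoopB txt chk f (m + chk.length) true
          (acc ++ (if m = 0 ∨ txt[m-1]? = some '\n' then chk else '\n' :: chk))
      | none, some g => pvLoopB txt chk f (g + 1) false (acc ++ ['>'])
      | some m, some g =>
        if m ≤ g then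
          pvLoopB txt chk f (m + chk.length) true
            (acc ++ (if m = 0 ∨ txt[m-1]? = some '\n' then chk else '\n' :: chk))
        else pvLoopB txt chk f (g + 1) false (acc ++ ['>'])

def remove_decorates_func_alt (originalTxt : String) (str2Check : String) : String :=
  String.mk (pvLoopB originalTxt.toList str2Check.toList (originalTxt.toList.length + 1) 0 false [])

-- ===== PRECONDITION & SPEC =====
-- Pre_ excludes only str2Check = "": there the always-matching empty slice never advances idx, so
-- both A and B loop forever on every nonempty originalTxt; on originalTxt = "" A returns "" (the
-- while loop is never entered) while B's find('',0) = 0 still loops forever.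
def Pre_remove_decorates_func (originalTxt : String) (str2Check : String) : Prop := str2Check ≠ ""
instance (originalTxt : String) (str2Check : String) : Decidable (Pre_remove_decorates_func originalTxt str2Check) := by unfold Pre_remove_decorates_func; infer_instance
def pvWitness_remove_decorates_func : String × String := ("t<c x>y\n<c z>w", "<c")

def Spec_remove_decorates_func (originalTxt : String) (str2Check : String) (out : String) : Prop := out = remove_decorates_func_alt originalTxt str2Check
instance (originalTxt : String) (str2Check : String) (out : String) : Decidable (Spec_remove_decorates_func originalTxt str2Check out) := by unfold Spec_remove_decorates_func; infer_instance

-- ===== CLAIM (what is proved, stated in full; the proofs are below) =====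
def Claim_equal_remove_decorates_func : Prop := ∀ (originalTxt : String) (str2Check : String), Dom_remove_decorates_func originalTxt str2Check → Pre_remove_decorates_func originalTxt str2Check → Spec_remove_decorates_func originalTxt str2Check (remove_decorates_func originalTxt str2Check)

-- ===== LEMMAS AND PROOFS =====

-- unfold lemma for pvFindFrom
theorem pvFindFrom_eq (txt chk : List Char) (i : Nat) :
    pvFindFrom txt chk i =
      if txt.length ≤ i then none
      else if (txt.drop i).take chk.length = chk then some i
      else pvFindFrom txt chk (i+1) := by
  rw [pvFindFrom]; split <;> simp

-- a match at m fits inside txt (chk nonempty)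
theorem pvMatch_bound {txt chk : List Char} (hchk : chk ≠ []) {m : Nat}
    (h : (txt.drop m).take chk.length = chk) : m + chk.length ≤ txt.length := by
  have := congrArg List.length h
  simp [List.length_take, List.length_drop] at this
  have hc : 0 < chk.length := List.length_pos_iff.mpr hchk
  omega

theorem pvFind_ge {txt chk : List Char} : ∀ {i m : Nat}, pvFindFrom txt chk i = some m → i ≤ m := by
  intro i
  induction' hk : txt.length - i using Nat.strong_induction_on with k ih generalizing i
  intro m h
  rw [pvFindFrom_eq] at h
  split at h
  · exact absurd h (by simp)
  · split at h
    · simp at h; omega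
    · have := ih (txt.length - (i+1)) (by omega) rfl h
      omega

theorem pvFind_none_succ {txt chk : List Char} {i : Nat}
    (h : pvFindFrom txt chk i = none) : pvFindFrom txt chk (i+1) = none := by
  rw [pvFindFrom_eq] at h
  split at h
  · rw [pvFindFrom_eq]; simp; omega
  · split at h
    · exact absurd h (by simp)
    · exact h

theorem pvFind_none_nomatch {txt chk : List Char} {i : Nat}
    (h : pvFindFrom txt chk i = none) (hi : i < txt.length) :
    ¬ (txt.drop i).take chk.length = chk := by
  rw [pvFindFrom_eq] at h
  split at h
  · omega
  · split at h
    · exact absurd h (by simp)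
    · intro hm; simp_all

theorem pvFind_some_cases {txt chk : List Char} {i m : Nat}
    (h : pvFindFrom txt chk i = some m) :
    i < txt.length ∧
      ((m = i ∧ (txt.drop i).take chk.length = chk) ∨
       (¬ (txt.drop i).take chk.length = chk ∧ pvFindFrom txt chk (i+1) = some m)) := by
  rw [pvFindFrom_eq] at h
  split at h
  · exact absurd h (by simp)
  · constructor
    · omega
    · split at h
      · simp at h; left; exact ⟨h.symm, by assumption⟩
      · right; exact ⟨by assumption, h⟩

theorem pvFind_some_match {txt chk : List Char} : ∀ {i m : Nat},
    pvFindFrom txt chk i = some m → (txt.drop m).take chk.length = chk := by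
  intro i
  induction' hk : txt.length - i using Nat.strong_induction_on with k ih generalizing i
  intro m h
  obtain ⟨hi, hc⟩ := pvFind_some_cases h
  rcases hc with ⟨rfl, hm⟩ | ⟨_, h'⟩
  · exact hm
  · exact ih (txt.length - (i+1)) (by omega) rfl h'

-- fuel irrelevance for loop A (needs chk ≠ [] so every step advances)
theorem pvLoopA_mono {txt chk : List Char} (hchk : chk ≠ []) :
    ∀ (f₁ f₂ idx : Nat) (del : Bool) (acc : List Char),
      txt.length - idx ≤ f₁ → txt.length - idx ≤ f₂ →
      pvLoopA txt chk f₁ idx del acc = pvLoopA txt chk f₂ idx del acc := by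
  have hc : 0 < chk.length := List.length_pos_iff.mpr hchk
  intro f₁
  induction f₁ with
  | zero =>
    intro f₂ idx del acc h1 h2
    have hidx : ¬ idx < txt.length := by omega
    cases f₂ with
    | zero => rfl
    | succ f => simp [pvLoopA, hidx]
  | succ f ih =>
    intro f₂ idx del acc h1 h2
    by_cases hidx : idx < txt.length
    · cases f₂ with
      | zero => omega
      | succ f₂' =>
        simp only [pvLoopA, if_pos hidx]
        split
        · exact ih _ _ _ _ (by omega) (by omega)
        · split
          · exact ih _ _ _ _ (by omega) (by omega)
          · exact ih _ _ _ _ (by omega) (by omega)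
    · cases f₂ with
      | zero => simp [pvLoopA, hidx]
      | succ f₂' => simp [pvLoopA, hidx]

-- copy mode, no marker ahead: A copies the rest verbatim
theorem pvA_copy_none {txt chk : List Char} (hchk : chk ≠ []) :
    ∀ (f : Nat) {idx : Nat} {acc : List Char},
      txt.length - idx ≤ f → pvFindFrom txt chk idx = none →
      pvLoopA txt chk f idx false acc = acc ++ txt.drop idx := by
  intro f
  induction f with
  | zero =>
    intro idx acc h1 _
    have hle : txt.length ≤ idx := by omega
    simp [pvLoopA, List.drop_eq_nil_of_le hle]
  | succ f ih =>
    intro idx acc h1 hnone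
    by_cases hidx : idx < txt.length
    · have hnm := pvFind_none_nomatch hnone hidx
      simp only [pvLoopA, if_pos hidx, if_neg hnm]
      rw [if_neg (by simp : ¬ (false = true ∧ (txt.drop idx).take 1 = ['>']))]
      rw [if_neg (by simp : ¬ (false = true))]
      rw [ih (by omega) (pvFind_none_succ hnone)]
      have hd : txt.drop idx = txt[idx] :: txt.drop (idx+1) := List.drop_eq_getElem_cons hidx
      rw [hd]; simp
    · have hle : txt.length ≤ idx := by omega
      simp [pvLoopA, hidx, List.drop_eq_nil_of_le hle]

-- copy mode, marker at m: A copies up to m, emits the marker, continues in delete mode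
theorem pvA_copy_some {txt chk : List Char} (hchk : chk ≠ []) :
    ∀ (f : Nat) {idx m : Nat} {acc : List Char},
      txt.length - idx ≤ f → pvFindFrom txt chk idx = some m →
      pvLoopA txt chk f idx false acc =
        pvLoopA txt chk (txt.length - (m + chk.length)) (m + chk.length) true
          (acc ++ (txt.drop idx).take (m - idx) ++
            (if m = 0 ∨ txt[m-1]? = some '\n' then chk else '\n' :: chk)) := by
  have hc : 0 < chk.length := List.length_pos_iff.mpr hchk
  intro f
  induction f with
  | zero =>
    intro idx m acc h1 hsome
    obtain ⟨hi, _⟩ := pvFind_some_cases hsome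
    omega
  | succ f ih =>
    intro idx m acc h1 hsome
    obtain ⟨hi, hcase⟩ := pvFind_some_cases hsome
    rcases hcase with ⟨rfl, hm⟩ | ⟨hnm, h'⟩
    · simp only [Nat.sub_self, List.take_zero, List.append_nil]
      simp only [pvLoopA, if_pos hi, if_pos hm]
      exact pvLoopA_mono hchk f _ _ _ _ (by omega) (by omega)
    · have hge := pvFind_ge h'
      simp only [pvLoopA, if_pos hi, if_neg hnm]
      rw [if_neg (by simp : ¬ (false = true ∧ (txt.drop idx).take 1 = ['>']))]
      rw [if_neg (by simp : ¬ (false = true))]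
      rw [ih (idx := idx+1) (m := m) (by omega) h']
      have hd : txt.drop idx = txt[idx] :: txt.drop (idx+1) := List.drop_eq_getElem_cons hi
      have hmi : m - idx = (m-(idx+1)) + 1 := by omega
      have ht1 : (txt.drop idx).take 1 = [txt[idx]] := List.take_one_drop_eq_of_lt_length hi
      have ht : (txt.drop idx).take (m - idx) =
          txt[idx] :: (txt.drop (idx+1)).take (m-(idx+1)) := by rw [hmi, hd, List.take_succ_cons]
      have hacc : (txt.drop idx).take 1 ++ (txt.drop (idx+1)).take (m-(idx+1)) =
          (txt.drop idx).take (m - idx) := by rw [ht1, ht]; rfl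
      rw [← hacc]
      simp [List.append_assoc]

-- delete mode, nothing ahead: A drops the rest
theorem pvA_del_none {txt chk : List Char} (hchk : chk ≠ []) :
    ∀ (f : Nat) {idx : Nat} {acc : List Char},
      txt.length - idx ≤ f → pvFindFrom txt chk idx = none →
      pvFindFrom txt ['>'] idx = none →
      pvLoopA txt chk f idx true acc = acc := by
  intro f
  induction f with
  | zero => intro idx acc _ _ _; rfl
  | succ f ih =>
    intro idx acc h1 hm hg
    by_cases hidx : idx < txt.length
    · have hnm := pvFind_none_nomatch hm hidx
      have hng : ¬ (txt.drop idx).take 1 = ['>'] := by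
        have := pvFind_none_nomatch hg hidx; simpa using this
      simp only [pvLoopA, if_pos hidx, if_neg hnm]
      rw [if_neg (by intro h; exact hng h.2)]
      rw [if_pos trivial]
      exact ih (by omega) (pvFind_none_succ hm) (pvFind_none_succ hg)
    · simp [pvLoopA, hidx]

-- delete mode, marker first: A skips to m, re-emits the marker, stays in delete mode
theorem pvA_del_marker {txt chk : List Char} (hchk : chk ≠ []) :
    ∀ (f : Nat) {idx m : Nat} {acc : List Char},
      txt.length - idx ≤ f → pvFindFrom txt chk idx = some m →
      (∀ g, pvFindFrom txt ['>'] idx = some g → m ≤ g) →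
      pvLoopA txt chk f idx true acc =
        pvLoopA txt chk (txt.length - (m + chk.length)) (m + chk.length) true
          (acc ++ (if m = 0 ∨ txt[m-1]? = some '\n' then chk else '\n' :: chk)) := by
  have hc : 0 < chk.length := List.length_pos_iff.mpr hchk
  intro f
  induction f with
  | zero =>
    intro idx m acc h1 hsome _
    obtain ⟨hi, _⟩ := pvFind_some_cases hsome
    omega
  | succ f ih =>
    intro idx m acc h1 hsome hg
    obtain ⟨hi, hcase⟩ := pvFind_some_cases hsome
    rcases hcase with ⟨rfl, hm⟩ | ⟨hnm, h'⟩
    · simp only [pvLoopA, if_pos hi, if_pos hm]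
      exact pvLoopA_mono hchk f _ _ _ _ (by omega) (by omega)
    · have hge := pvFind_ge h'
      have hng : ¬ (txt.drop idx).take 1 = ['>'] := by
        intro hgt
        have hsg : pvFindFrom txt ['>'] idx = some idx := by
          rw [pvFindFrom_eq, if_neg (by omega : ¬ txt.length ≤ idx)]
          rw [if_pos (by simpa using hgt)]
        have := hg idx hsg
        omega
      simp only [pvLoopA, if_pos hi, if_neg hnm]
      rw [if_neg (by intro h; exact hng h.2)]
      rw [if_pos trivial]
      refine ih (idx := idx+1) (m := m) (by omega) h' ?_
      intro g hgs
      apply hg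
      rw [pvFindFrom_eq, if_neg (by omega : ¬ txt.length ≤ idx), if_neg (by simpa using hng)]
      exact hgs

-- delete mode, '>' first: A skips to g, emits '>', returns to copy mode
theorem pvA_del_gt {txt chk : List Char} (hchk : chk ≠ []) :
    ∀ (f : Nat) {idx g : Nat} {acc : List Char},
      txt.length - idx ≤ f → pvFindFrom txt ['>'] idx = some g →
      (∀ m, pvFindFrom txt chk idx = some m → g < m) →
      pvLoopA txt chk f idx true acc =
        pvLoopA txt chk (txt.length - (g + 1)) (g + 1) false (acc ++ ['>']) := by
  have hc : 0 < chk.length := List.length_pos_iff.mpr hchk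
  intro f
  induction f with
  | zero =>
    intro idx g acc h1 hsome _
    obtain ⟨hi, _⟩ := pvFind_some_cases hsome
    omega
  | succ f ih =>
    intro idx g acc h1 hsome hm
    obtain ⟨hi, hcase⟩ := pvFind_some_cases hsome
    have hgge := pvFind_ge hsome
    have hnm : ¬ (txt.drop idx).take chk.length = chk := by
      intro hmm
      have hsi : pvFindFrom txt chk idx = some idx := by
        rw [pvFindFrom_eq, if_neg (by omega : ¬ txt.length ≤ idx), if_pos hmm]
      have := hm idx hsi
      omega
    rcases hcase with ⟨rfl, hgm⟩ | ⟨hng, h'⟩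
    · simp only [pvLoopA, if_pos hi, if_neg hnm]
      rw [if_pos (⟨by simp, by simpa using hgm⟩ : _ ∧ _)]
      exact pvLoopA_mono hchk f _ _ _ _ (by omega) (by omega)
    · simp only [pvLoopA, if_pos hi, if_neg hnm]
      rw [if_neg (by intro h; exact hng (by simpa using h.2))]
      rw [if_pos trivial]
      refine ih (idx := idx+1) (g := g) (by omega) h' ?_
      intro m' hms
      apply hm
      rw [pvFindFrom_eq, if_neg (by omega : ¬ txt.length ≤ idx), if_neg hnm]
      exact hms

-- main simulation: B's jumping loop computes A's loop
theorem pvLoopB_eq_loopA {txt chk : List Char} (hchk : chk ≠ []) :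
    ∀ (f : Nat) {idx : Nat} {del : Bool} {acc : List Char},
      txt.length - idx < f →
      pvLoopB txt chk f idx del acc = pvLoopA txt chk (txt.length - idx) idx del acc := by
  have hc : 0 < chk.length := List.length_pos_iff.mpr hchk
  intro f
  induction f with
  | zero => intro idx del acc h; omega
  | succ f ih =>
    intro idx del acc h
    cases del with
    | false =>
      cases hf : pvFindFrom txt chk idx with
      | none =>
        simp only [pvLoopB, hf]
        rw [if_pos trivial]
        rw [pvA_copy_none hchk _ (le_refl _) hf]
      | some m =>
        have hb := pvMatch_bound hchk (pvFind_some_match hf)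
        have hge := pvFind_ge hf
        simp only [pvLoopB, hf]
        rw [if_pos trivial]
        rw [ih (idx := m + chk.length) (by omega)]
        rw [pvA_copy_some hchk _ (le_refl _) hf]
    | true =>
      cases hf : pvFindFrom txt chk idx with
      | none =>
        cases hg : pvFindFrom txt ['>'] idx with
        | none =>
          simp only [pvLoopB, hf, hg]
          rw [if_neg (by simp : ¬ (true = false))]
          rw [pvA_del_none hchk _ (le_refl _) hf hg]
        | some g =>
          have hbg : g + 1 ≤ txt.length := by
            simpa using pvMatch_bound (show (['>'] : List Char) ≠ [] by simp)
              (pvFind_some_match hg)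
          have hgeg := pvFind_ge hg
          simp only [pvLoopB, hf, hg]
          rw [if_neg (by simp : ¬ (true = false))]
          rw [ih (idx := g + 1) (by omega)]
          rw [pvA_del_gt hchk _ (le_refl _) hg
            (by intro m hmx; rw [hf] at hmx; exact absurd hmx (by simp))]
      | some m =>
        have hbm := pvMatch_bound hchk (pvFind_some_match hf)
        have hgem := pvFind_ge hf
        cases hg : pvFindFrom txt ['>'] idx with
        | none =>
          simp only [pvLoopB, hf, hg]
          rw [if_neg (by simp : ¬ (true = false))]
          rw [ih (idx := m + chk.length) (by omega)]
          rw [pvA_del_marker hchk _ (le_refl _) hf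
            (by intro g hgx; rw [hg] at hgx; exact absurd hgx (by simp))]
        | some g =>
          have hbg : g + 1 ≤ txt.length := by
            simpa using pvMatch_bound (show (['>'] : List Char) ≠ [] by simp)
              (pvFind_some_match hg)
          have hgeg := pvFind_ge hg
          simp only [pvLoopB, hf, hg]
          rw [if_neg (by simp : ¬ (true = false))]
          by_cases hmg : m ≤ g
          · rw [if_pos hmg, ih (idx := m + chk.length) (by omega)]
            rw [pvA_del_marker hchk _ (le_refl _) hf
              (by intro g' hgx; rw [hg] at hgx; simp at hgx; omega)]
          · rw [if_neg hmg, ih (idx := g + 1) (by omega)]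
            rw [pvA_del_gt hchk _ (le_refl _) hg
              (by intro m' hmx; rw [hf] at hmx; simp at hmx; omega)]

-- ===== VERDICT (by name: the statement is the Claim_ definition above) =====
theorem remove_decorates_func_spec : Claim_equal_remove_decorates_func := by
  intro originalTxt str2Check _ hpre
  unfold Spec_remove_decorates_func remove_decorates_func remove_decorates_func_alt
  have hchk : str2Check.toList ≠ [] := by
    intro h
    apply hpre
    have := congrArg String.ofList h
    rwa [String.asString_toList] at this
  rw [pvLoopB_eq_loopA hchk _ (by omega)]
  simp
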